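-- pv_equiv track=rewrite | github.com/fortenforge/cryptopals | challenges/clone_MT19937.py | undo_right
-- ===== SOURCE A (Python) =====
-- INT_SIZE = 32
--
-- MAX_INT  = (1 << INT_SIZE) - 1
--
-- def undo_right(y, shift):
--   x = 0
--   y_old = 0
--   i = 0
--
--   while i*shift < INT_SIZE:
--     if (i+1)*shift > INT_SIZE:
--       x = x >> ((i+1)*shift - INT_SIZE)
--     else:
--       x = x << (INT_SIZE - (i+1)*shift)
--     x = (((x ^ y) << (i*shift)) & MAX_INT) >> (INT_SIZE - shift)
--     y_old = (y_old << shift) + x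
--
--     if (i+1)*shift > INT_SIZE:
--       y_old = y_old >> (shift - (INT_SIZE % shift))
--
--     i += 1
--
--   return y_old
-- ===== SOURCE B (Python) =====
-- INT_SIZE = 32
--
-- MAX_INT = (1 << INT_SIZE) - 1
--
-- def undo_right(y, shift):
--   # classic fixed-point inversion of the temper step x ^ (x >> shift)
--   y &= MAX_INT
--   x = y
--   i = 0
--   while i * shift < INT_SIZE:
--     x = y ^ (x >> shift)
--     i += 1
--   return x
-- ===== Notes on version B (the rewrite author's own statement) =====
-- stated objective: simpler
-- what changed: Replaces A's block-by-block reconstruction (extracting each shift-wide block with per-iteration shift/mask bookkeeping and reassembling it into y_old) by the classic fixed-point iteration x = y ^ (x >> shift) with the same loop guard, which converges to the untempered value.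
import Mathlib
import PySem

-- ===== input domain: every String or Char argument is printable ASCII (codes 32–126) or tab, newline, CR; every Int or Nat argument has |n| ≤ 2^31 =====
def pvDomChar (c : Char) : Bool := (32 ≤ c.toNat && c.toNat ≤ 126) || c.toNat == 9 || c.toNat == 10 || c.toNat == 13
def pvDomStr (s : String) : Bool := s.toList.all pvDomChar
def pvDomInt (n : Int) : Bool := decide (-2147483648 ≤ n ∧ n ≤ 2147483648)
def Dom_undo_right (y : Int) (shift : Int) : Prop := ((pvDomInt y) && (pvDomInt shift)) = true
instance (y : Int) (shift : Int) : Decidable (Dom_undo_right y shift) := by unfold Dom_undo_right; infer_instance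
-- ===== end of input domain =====

-- B replaces A's block-by-block reconstruction by the classic fixed-point iteration
-- x = y ^ (x >> shift) with the same loop guard (objective: simpler).

-- ===== PORT A =====
-- literal port of A's while loop; the fuel (33) never runs out under Pre_ (at most 32 iterations)
def undoRightLoopA (y : Int) (shift : Int) (x y_old i : Int) : Nat → Int
  | 0 => y_old
  | fuel+1 =>
    if i * shift < 32 then
      let x1 : Int := if (i+1)*shift > 32 then x >>> ((i+1)*shift - 32).toNat
                      else x <<< (32 - (i+1)*shift).toNat
      let x2 : Int := (PySem.Int.band ((PySem.Int.bxor x1 y) <<< (i*shift).toNat) 4294967295) >>> (32 - shift).toNat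
      let y1 : Int := (y_old <<< shift.toNat) + x2
      let y2 : Int := if (i+1)*shift > 32 then y1 >>> (shift - PySem.Int.mod 32 shift).toNat else y1
      undoRightLoopA y shift x2 y2 (i+1) fuel
    else y_old

def undo_right (y : Int) (shift : Int) : Int := undoRightLoopA y shift 0 0 0 33

-- ===== PORT B =====
def undoRightLoopB (y : Int) (shift : Int) (x i : Int) : Nat → Int
  | 0 => x
  | fuel+1 =>
    if i * shift < 32 then
      undoRightLoopB y shift (PySem.Int.bxor y (x >>> shift.toNat)) (i+1) fuel
    else x

def undo_right_alt (y : Int) (shift : Int) : Int :=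
  let ym : Int := PySem.Int.band y 4294967295
  undoRightLoopB ym shift ym 0 33

-- ===== PRECONDITION & SPEC =====
-- Pre_ excludes shift ≤ 0 (A's while loop never terminates there) and shift > 32
-- (A raises ValueError: negative shift count in '>> (INT_SIZE - shift)').
def Pre_undo_right (y : Int) (shift : Int) : Prop := 1 ≤ shift ∧ shift ≤ 32
instance (y : Int) (shift : Int) : Decidable (Pre_undo_right y shift) := by unfold Pre_undo_right; infer_instance

def pvWitness_undo_right : Int × Int := (123456789, 7)

def Spec_undo_right (y : Int) (shift : Int) (out : Int) : Prop := out = undo_right_alt y shift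
instance (y : Int) (shift : Int) (out : Int) : Decidable (Spec_undo_right y shift out) := by unfold Spec_undo_right; infer_instance

-- ===== CLAIM (what is proved, stated in full; the proofs are below) =====
def Claim_equal_undo_right : Prop := ∀ (y : Int) (shift : Int), Dom_undo_right y shift → Pre_undo_right y shift → Spec_undo_right y shift (undo_right y shift)

-- ===== LEMMAS AND PROOFS =====

-- Nat-level models of the two loops (the ports are bridged to these, then the models are compared)

def modelA (Y s : Nat) (x yo i : Nat) : Nat → Nat
  | 0 => yo
  | fuel+1 =>
    if i * s < 32 then
      let x1 : Nat := if (i+1)*s > 32 then x >>> ((i+1)*s - 32) else x <<< (32 - (i+1)*s)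
      let x2 : Nat := (((x1 ^^^ Y) <<< (i*s)) % 4294967296) >>> (32 - s)
      let y1 : Nat := (yo <<< s) + x2
      let y2 : Nat := if (i+1)*s > 32 then y1 >>> (s - 32 % s) else y1
      modelA Y s x2 y2 (i+1) fuel
    else yo

def modelB (Y s : Nat) (x i : Nat) : Nat → Nat
  | 0 => x
  | fuel+1 => if i * s < 32 then modelB Y s (Y ^^^ (x >>> s)) (i+1) fuel else x

-- the xor-sum xsum k = Y ^^^ (Y >>> s) ^^^ … ^^^ (Y >>> ((k-1)*s)); the common value of both loops is xsum 33
def xsum (Y s : Nat) : Nat → Nat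
  | 0 => 0
  | k+1 => Y ^^^ (xsum Y s k >>> s)

theorem xsum_succ_eq_xor (Y s : Nat) : ∀ k, xsum Y s (k+1) = xsum Y s k ^^^ (Y >>> (k*s)) := by
  intro k
  induction k with
  | zero => simp [xsum]
  | succ k ih =>
    show Y ^^^ (xsum Y s (k+1) >>> s) = xsum Y s (k+1) ^^^ Y >>> ((k+1)*s)
    conv_lhs => rw [ih]
    rw [Nat.shiftRight_xor_distrib, ← Nat.shiftRight_add]
    have h2 : k*s+s = (k+1)*s := by ring
    rw [h2]
    show Y ^^^ (xsum Y s k >>> s ^^^ Y >>> ((k+1)*s)) = (Y ^^^ xsum Y s k >>> s) ^^^ Y >>> ((k+1)*s)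
    rw [Nat.xor_assoc]

theorem xsum_lt (Y s : Nat) (hY : Y < 4294967296) : ∀ k, xsum Y s k < 4294967296 := by
  intro k
  induction k with
  | zero => simp [xsum]
  | succ k ih =>
    show Y ^^^ (xsum Y s k >>> s) < 4294967296
    have h1 : xsum Y s k >>> s < 2^32 := lt_of_le_of_lt (Nat.shiftRight_le _ _) ih
    exact Nat.xor_lt_two_pow hY h1

theorem xsum_stable (Y s : Nat) (hY : Y < 4294967296) {k : Nat} (h : 32 ≤ k * s) :
    xsum Y s (k+1) = xsum Y s k := by
  rw [xsum_succ_eq_xor]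
  have : Y >>> (k*s) = 0 := by
    rw [Nat.shiftRight_eq_div_pow]
    apply Nat.div_eq_of_lt
    calc Y < 2^32 := hY
    _ ≤ 2^(k*s) := Nat.pow_le_pow_right (by norm_num) h
  simp [this]

theorem xsum_chain (Y s : Nat) (hY : Y < 4294967296) {j k : Nat} (hj : 32 ≤ j * s) (hjk : j ≤ k) :
    xsum Y s (k+1) = xsum Y s (j+1) := by
  induction k with
  | zero =>
    have hj0 : j = 0 := by omega
    subst hj0; simp at hj
  | succ k ih =>
    rcases Nat.eq_or_lt_of_le hjk with h | h
    · rw [h]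
    · have hk : j ≤ k := by omega
      have hst := xsum_stable Y s hY (k := k+1) (le_trans hj (Nat.mul_le_mul_right s (by omega : j ≤ k+1)))
      rw [hst, ih hk]

theorem xsum_fix (Y s : Nat) (hY : Y < 4294967296) (hs : 1 ≤ s) :
    Y ^^^ (xsum Y s 33 >>> s) = xsum Y s 33 := by
  have := xsum_stable Y s hY (k := 33) (by omega)
  calc Y ^^^ (xsum Y s 33 >>> s) = xsum Y s 34 := rfl
  _ = xsum Y s 33 := this

-- model B computes xsum 33
theorem modelB_eq (Y s : Nat) (hY : Y < 4294967296) (hs : 1 ≤ s) :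
    ∀ fuel i, i ≤ 32 → 32 ≤ i + fuel → modelB Y s (xsum Y s (i+1)) i fuel = xsum Y s 33 := by
  intro fuel
  induction fuel with
  | zero =>
    intro i h1 h2
    have hi : i = 32 := by omega
    subst hi; rfl
  | succ fuel ih =>
    intro i h1 h2
    by_cases hg : i * s < 32
    · have hi32 : i < 32 := by
        have := Nat.le_mul_of_pos_right i (show 0 < s by omega)
        omega
      simp only [modelB, hg, if_true]
      have hx : Y ^^^ (xsum Y s (i+1) >>> s) = xsum Y s (i+2) := rfl
      rw [hx]
      exact ih (i+1) (by omega) (by omega)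
    · simp only [modelB, hg, if_false]
      exact (xsum_chain Y s hY (j := i) (k := 32) (by omega) h1).symm

theorem compl_eq_xor (n : Nat) : ∀ x, x < 2^n → x ^^^ (2^n - 1) = 2^n - 1 - x := by
  induction n with
  | zero => intro x hx; interval_cases x; rfl
  | succ n ih =>
    intro x hx
    have hd : (x ^^^ (2^(n+1) - 1)) / 2 = 2^n - 1 - x / 2 := by
      rw [Nat.xor_div_two]
      have h1 : (2^(n+1) - 1) / 2 = 2^n - 1 := by
        have : 2^(n+1) = 2*2^n := by ring
        omega
      rw [h1]
      exact ih (x/2) (by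
        have hh : 2^(n+1) = 2*2^n := by ring
        omega)
    have hm : (x ^^^ (2^(n+1) - 1)) % 2 = (x + 1) % 2 := by
      rw [Nat.xor_mod_two_eq]
      have h2 : (2^(n+1) - 1) % 2 = 1 := by
        have : 2^(n+1) = 2*2^n := by ring
        omega
      omega
    have := Nat.div_add_mod (x ^^^ (2^(n+1) - 1)) 2
    have hx2 := Nat.div_add_mod x 2
    have hp : 2^(n+1) = 2*2^n := by ring
    have hxm : x % 2 < 2 := Nat.mod_lt _ (by norm_num)
    omega

theorem xor_mod_right (a b n : Nat) : (a ^^^ b % 2^n) % 2^n = (a ^^^ b) % 2^n := by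
  apply Nat.eq_of_testBit_eq
  intro i
  simp only [Nat.testBit_mod_two_pow, Nat.testBit_xor]
  by_cases h : i < n <;> simp [h]

-- the inner temper-undo expression of A, at a non-final iteration

-- the inner temper-undo expression of A, at a non-final iteration
theorem coreA_mid (Y g s i : Nat) (hs : 1 ≤ s) (h32 : (i+1)*s ≤ 32)
    (hg : g < 4294967296) (hfix : Y ^^^ (g >>> s) = g) :
    (((((((g >>> (32 - i*s)) % 2^s) <<< (32 - (i+1)*s)) ^^^ Y) <<< (i*s)) % 4294967296) >>> (32 - s))
      = (g >>> (32 - (i+1)*s)) % 2^s := by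
  have e : (i+1)*s = i*s + s := by ring
  obtain ⟨m, hm⟩ : ∃ m, 32 = i*s + s + m := ⟨32 - (i+1)*s, by omega⟩
  have r1 : 32 - i*s = m + s := by omega
  have r2 : 32 - (i+1)*s = m := by omega
  have r3 : 32 - s = i*s + m := by omega
  have r4 : (4294967296 : Nat) = 2^32 := by norm_num
  rw [r1, r2, r3, r4]
  apply Nat.eq_of_testBit_eq
  intro j
  have hfix' := congrArg (fun t => Nat.testBit t (m+j)) hfix
  simp only [Nat.testBit_xor, Nat.testBit_shiftRight] at hfix'
  simp only [Nat.testBit_shiftRight, Nat.testBit_mod_two_pow, Nat.testBit_shiftLeft, Nat.testBit_xor]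
  by_cases hj : j < s
  · have c1 : i*s + m + j < 32 := by omega
    have c2 : i*s ≤ i*s + m + j := by omega
    have c3 : i*s + m + j - i*s = m + j := by omega
    have c4 : m ≤ m + j := by omega
    have c5 : m + j - m = j := by omega
    have c6 : m + s + j = s + (m + j) := by omega
    simp [c1, c2, c3, c4, c5, hj, c6]
    rw [Bool.xor_comm]
    exact hfix'
  · have c1 : ¬ (i*s + m + j < 32) := by omega
    simp [c1, hj]

-- reassembly at a non-final iteration
theorem coreA_dec (g s i : Nat) (h32 : (i+1)*s ≤ 32) :
    ((g >>> (32 - i*s)) <<< s) + (g >>> (32 - (i+1)*s)) % 2^s = g >>> (32 - (i+1)*s) := by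
  have e : (i+1)*s = i*s + s := by ring
  have r1 : 32 - i*s = (32 - (i+1)*s) + s := by omega
  rw [r1, Nat.shiftRight_add, Nat.shiftLeft_eq, Nat.shiftRight_eq_div_pow (g >>> (32 - (i+1)*s)) s]
  exact Nat.div_add_mod' _ _

-- the final (overshooting) iteration of A lands exactly on g
theorem coreA_last (Y g s i : Nat) (hs : 1 ≤ s) (hs32 : s ≤ 32) (hlo : i*s < 32) (hhi : 32 < (i+1)*s)
    (hY : Y < 4294967296) (hg : g < 4294967296) (hfix : Y ^^^ (g >>> s) = g) :
    (((g >>> (32 - i*s)) <<< s) +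
       ((((((g >>> (32 - i*s)) % 2^s) >>> ((i+1)*s - 32)) ^^^ Y) <<< (i*s)) % 4294967296) >>> (32 - s))
      >>> ((i+1)*s - 32) = g := by
  have e : (i+1)*s = i*s + s := by ring
  obtain ⟨d, hd⟩ : ∃ d, (i+1)*s - 32 = d := ⟨(i+1)*s - 32, rfl⟩
  have hd' : i*s + s = 32 + d := by omega
  have hdpos : 0 < d := by omega
  have hds : d < s := by omega
  obtain ⟨r, hr⟩ : ∃ r, 32 - i*s = r := ⟨32 - i*s, rfl⟩
  have hrs : r + d = s := by omega
  have hr32 : i*s + r = 32 := by omega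
  have r4 : (4294967296 : Nat) = 2^32 := by norm_num
  rw [hd, hr, r4]
  -- bound the recovered block
  set x2 := (((((((g >>> r) % 2^s) >>> d) ^^^ Y) <<< (i*s)) % 2^32)) >>> (32 - s) with hx2def
  have gen : ∀ a k t : Nat, a < 2^(k+t) → a >>> k < 2^t := by
    intro a k t h
    rw [Nat.shiftRight_eq_div_pow]
    apply Nat.div_lt_of_lt_mul
    rwa [← pow_add]
  have hx2 : x2 < 2^s := by
    rw [hx2def]
    apply gen _ (32-s) s
    calc ((((((g >>> r) % 2^s) >>> d) ^^^ Y) <<< (i*s))) % 2^32 < 2^32 := Nat.mod_lt _ (by norm_num)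
    _ ≤ 2^(32-s+s) := by apply Nat.pow_le_pow_right (by norm_num); omega
  rw [Nat.shiftLeft_eq, Nat.mul_comm]
  apply Nat.eq_of_testBit_eq
  intro j
  rw [Nat.testBit_shiftRight, Nat.testBit_two_pow_mul_add _ hx2]
  by_cases hj : d + j < s
  · -- bit comes from x2
    rw [if_pos hj, hx2def]
    simp only [Nat.testBit_shiftRight, Nat.testBit_mod_two_pow, Nat.testBit_shiftLeft, Nat.testBit_xor]
    have c1 : 32 - s + (d + j) = i*s + j := by omega
    rw [c1]
    by_cases hj32 : j < 32
    · have c2 : i*s + j < 32 := by omega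
      have c3 : i*s ≤ i*s + j := by omega
      have c4 : i*s + j - i*s = j := by omega
      have c5 : d + j < s := hj
      have c6 : r + (d + j) = s + j := by omega
      have hfix' := congrArg (fun t => Nat.testBit t j) hfix
      simp only [Nat.testBit_xor, Nat.testBit_shiftRight] at hfix'
      simp [c2, c3, c4, c5, c6]
      rw [Bool.xor_comm]
      exact hfix'
    · have c2 : ¬ (i*s + j < 32) := by omega
      have cg : Nat.testBit g j = false := by
        apply Nat.testBit_lt_two_pow
        calc g < 2^32 := by omega
        _ ≤ 2^j := Nat.pow_le_pow_right (by norm_num) (by omega)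
      simp [c2, cg]
  · -- bit comes from the already recovered prefix
    rw [if_neg hj]
    rw [Nat.testBit_shiftRight]
    have c1 : r + (d + j - s) = j := by omega
    rw [c1]

-- model A computes xsum 33 as well
theorem modelA_eq (Y s : Nat) (hY : Y < 4294967296) (hs : 1 ≤ s) (hs32 : s ≤ 32) :
    ∀ fuel i x, 32 ≤ i + fuel →
      (i*s ≤ 32 → x = (xsum Y s 33 >>> (32 - i*s)) % 2^s) →
      modelA Y s x (xsum Y s 33 >>> (32 - min (i*s) 32)) i fuel = xsum Y s 33 := by
  have hg : xsum Y s 33 < 4294967296 := xsum_lt Y s hY 33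
  have hfix : Y ^^^ (xsum Y s 33 >>> s) = xsum Y s 33 := xsum_fix Y s hY hs
  set g := xsum Y s 33 with hgdef
  intro fuel
  induction fuel with
  | zero =>
    intro i x h1 _
    have hi : 32 ≤ i := by omega
    have his : 32 ≤ i * s := le_trans hi (Nat.le_mul_of_pos_right i (by omega))
    have hmin : min (i*s) 32 = 32 := by omega
    rw [hmin]
    simp [modelA]
  | succ fuel ih =>
    intro i x h1 h2
    by_cases hgu : i * s < 32
    · have hmin : min (i*s) 32 = i*s := by omega
      rw [hmin]
      rw [h2 (le_of_lt hgu)]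
      have e : (i+1)*s = i*s + s := by ring
      by_cases hov : (i+1)*s > 32
      · -- final overshooting iteration
        simp only [modelA, if_pos hgu, if_pos hov]
        have hmod : 32 % s = 32 - i*s := by
          have h32 : (32:Nat) = s*i + (32 - i*s) := by
            rw [Nat.mul_comm]; omega
          conv_lhs => rw [h32]
          rw [Nat.mul_add_mod]
          exact Nat.mod_eq_of_lt (by omega)
        have hsm : s - 32 % s = (i+1)*s - 32 := by omega
        rw [hsm]
        rw [coreA_last Y g s i hs hs32 hgu hov hY hg hfix]
        have hmin2 : min ((i+1)*s) 32 = 32 := by omega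
        have hg0 : g = g >>> (32 - min ((i+1)*s) 32) := by
          rw [hmin2]; simp
        conv_lhs => rw [hg0]
        apply ih (i+1) _ (by omega)
        intro hcon; omega
      · -- normal iteration
        simp only [modelA, if_pos hgu, if_neg hov]
        rw [coreA_mid Y g s i hs (by omega) hg hfix]
        rw [coreA_dec g s i (by omega)]
        have hmin2 : min ((i+1)*s) 32 = (i+1)*s := by omega
        have hg0 : g >>> (32 - (i+1)*s) = g >>> (32 - min ((i+1)*s) 32) := by rw [hmin2]
        conv_lhs => rw [hg0]
        apply ih (i+1) _ (by omega)
        intro _; rw [hmin2]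
    · have hmin : min (i*s) 32 = 32 := by omega
      rw [hmin]
      simp [modelA, hgu]

-- Int-side bridges
theorem pymod_cast (s : Nat) : PySem.Int.mod 32 (↑s) = ↑(32 % s) := by
  show Int.fmod 32 (↑s) = ↑(32 % s)
  rw [Int.fmod_eq_emod, if_pos (Or.inl (by positivity))]
  push_cast; ring

theorem band_mask (z : Int) : PySem.Int.band z 4294967295 = z % 4294967296 := by
  show (if 0 ≤ z then _ else _) = _
  have hM : ((4294967295:Int)).toNat = 2^32 - 1 := by decide
  have hp : (2:Nat)^32 = 4294967296 := by norm_num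
  by_cases hz : 0 ≤ z
  · rw [if_pos hz, if_pos (by norm_num : (0:Int) ≤ 4294967295)]
    rw [hM, Nat.and_two_pow_sub_one_eq_mod, hp]
    omega
  · rw [if_neg hz, if_pos (by norm_num : (0:Int) ≤ 4294967295)]
    rw [hM, Nat.and_comm, Nat.and_two_pow_sub_one_eq_mod, hp]
    omega

theorem xor_mod32 (a b : Nat) : (a ^^^ b % 4294967296) % 4294967296 = (a ^^^ b) % 4294967296 := by
  have h := xor_mod_right a b 32
  norm_num at h
  exact h

theorem xor_compl_mod (a w : Nat) :
    (a ^^^ (4294967295 - w % 4294967296)) % 4294967296 = 4294967295 - (a ^^^ w) % 4294967296 := by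
  have hp : (4294967296:Nat) = 2^32 := by norm_num
  have hp1 : (4294967295:Nat) = 2^32 - 1 := by norm_num
  rw [hp, hp1]
  have h1 : 2^32 - 1 - w % 2^32 = (w % 2^32) ^^^ (2^32-1) :=
    (compl_eq_xor 32 (w % 2^32) (Nat.mod_lt _ (by norm_num))).symm
  have h2 : 2^32 - 1 - (a ^^^ w) % 2^32 = ((a ^^^ w) % 2^32) ^^^ (2^32-1) :=
    (compl_eq_xor 32 ((a ^^^ w) % 2^32) (Nat.mod_lt _ (by norm_num))).symm
  rw [h1, h2]
  apply Nat.eq_of_testBit_eq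
  intro j
  simp only [Nat.testBit_mod_two_pow, Nat.testBit_xor, Nat.testBit_two_pow_sub_one]
  by_cases hj : j < 32
  · simp only [hj, decide_true, Bool.true_and]
    cases a.testBit j <;> cases w.testBit j <;> simp
  · simp [hj]

theorem bxor_mod (a : Nat) (y : Int) :
    (PySem.Int.bxor (↑a) y) % 4294967296 = ↑((a ^^^ (y % 4294967296).toNat) % 4294967296) := by
  show (if 0 ≤ (a:Int) then _ else _) % _ = _
  rw [if_pos (by positivity : (0:Int) ≤ ↑a)]
  by_cases hy : 0 ≤ y
  · rw [if_pos hy, Int.toNat_natCast]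
    have h1 : (y % 4294967296).toNat = y.toNat % 4294967296 := by omega
    rw [h1, xor_mod32]
    omega
  · rw [if_neg hy, Int.toNat_natCast]
    have h1 : (y % 4294967296).toNat = 4294967295 - (-y-1).toNat % 4294967296 := by omega
    rw [h1, xor_compl_mod]
    omega

theorem coreA_int (a : Nat) (y : Int) (k : Nat) :
    PySem.Int.band ((PySem.Int.bxor (↑a) y) <<< k) 4294967295
      = ↑(((a ^^^ (y % 4294967296).toNat) <<< k) % 4294967296) := by
  rw [band_mask, Int.shiftLeft_eq]
  rw [Int.mul_emod, bxor_mod]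
  rw [show ((↑((a ^^^ (y % 4294967296).toNat) % 4294967296)):Int)
        = ↑(a ^^^ (y % 4294967296).toNat) % 4294967296 from by push_cast; ring]
  rw [← Int.mul_emod, Nat.shiftLeft_eq]
  push_cast
  ring

theorem bridgeA (y : Int) (s : Nat) (hs : 1 ≤ s) (hs32 : s ≤ 32) :
    ∀ fuel (x yo i : Nat),
      undoRightLoopA y (↑s) (↑x) (↑yo) (↑i) fuel
        = ↑(modelA ((y % 4294967296).toNat) s x yo i fuel) := by
  intro fuel
  induction fuel with
  | zero => intro x yo i; rfl
  | succ fuel ih =>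
    intro x yo i
    by_cases hg : i * s < 32
    · have hgi : (i:Int) * ↑s < 32 := by exact_mod_cast hg
      have hc1 : ((i:Int)+1) * ↑s = (((i+1)*s : Nat) : Int) := by push_cast; ring
      have hcis : ((i:Int) * ↑s).toNat = i * s := by
        rw [show (i:Int) * ↑s = ((i*s : Nat) : Int) from by push_cast; ring, Int.toNat_natCast]
      have hcs : ((s:Int)).toNat = s := Int.toNat_natCast s
      have hc32s : ((32:Int) - ↑s).toNat = 32 - s := by omega
      by_cases ho : (i+1)*s > 32
      · have hoi : ((i:Int)+1) * ↑s > 32 := by rw [hc1]; exact_mod_cast ho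
        simp only [undoRightLoopA, modelA, if_pos hgi, if_pos hg, if_pos hoi, if_pos ho]
        rw [show (((i:Int)+1)*↑s - 32).toNat = (i+1)*s - 32 from by rw [hc1]; omega]
        rw [← Int.natCast_shiftRight, hcis, coreA_int, hc32s, ← Int.natCast_shiftRight,
            hcs, ← Int.natCast_shiftLeft, ← Nat.cast_add, pymod_cast,
            show ((s:Int) - ↑(32 % s)).toNat = s - 32 % s from by omega,
            ← Int.natCast_shiftRight,
            show ((i:Int)+1) = (((i+1 : Nat)) : Int) from by push_cast; ring]
        exact ih _ _ _
      · have hoi : ¬ (((i:Int)+1) * ↑s > 32) := by rw [hc1]; exact_mod_cast ho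
        simp only [undoRightLoopA, modelA, if_pos hgi, if_pos hg, if_neg hoi, if_neg ho]
        rw [show (32 - ((i:Int)+1)*↑s).toNat = 32 - (i+1)*s from by rw [hc1]; omega]
        rw [← Int.natCast_shiftLeft, hcis, coreA_int, hc32s, ← Int.natCast_shiftRight,
            hcs, ← Int.natCast_shiftLeft, ← Nat.cast_add,
            show ((i:Int)+1) = (((i+1 : Nat)) : Int) from by push_cast; ring]
        exact ih _ _ _
    · have hgi : ¬ ((i:Int) * ↑s < 32) := by exact_mod_cast hg
      simp only [undoRightLoopA, modelA, if_neg hgi, if_neg hg]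

theorem bridgeB (Y : Nat) (s : Nat) :
    ∀ fuel (x i : Nat),
      undoRightLoopB (↑Y) (↑s) (↑x) (↑i) fuel = ↑(modelB Y s x i fuel) := by
  intro fuel
  induction fuel with
  | zero => intro x i; rfl
  | succ fuel ih =>
    intro x i
    by_cases hg : i * s < 32
    · have hgi : (i:Int) * ↑s < 32 := by exact_mod_cast hg
      simp only [undoRightLoopB, modelB, if_pos hgi, if_pos hg]
      rw [Int.toNat_natCast, ← Int.natCast_shiftRight,
          show PySem.Int.bxor (↑Y) (↑(x >>> s) : Int) = ((Y ^^^ (x >>> s) : Nat) : Int) from by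
            exact PySem.Int.bxor_natCast Y (x >>> s),
          show ((i:Int)+1) = (((i+1 : Nat)) : Int) from by push_cast; ring]
      exact ih _ _
    · have hgi : ¬ ((i:Int) * ↑s < 32) := by exact_mod_cast hg
      simp only [undoRightLoopB, modelB, if_neg hgi, if_neg hg]


-- ===== VERDICT (by name: the statement is the Claim_ definition above) =====
theorem undo_right_spec : Claim_equal_undo_right := by
  intro y shift hdom hpre
  obtain ⟨h1, h2⟩ := hpre
  obtain ⟨s, rfl⟩ : ∃ s : Nat, shift = ↑s := ⟨shift.toNat, by omega⟩
  have hs : 1 ≤ s := by exact_mod_cast h1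
  have hs32 : s ≤ 32 := by exact_mod_cast h2
  have hY : (y % 4294967296).toNat < 4294967296 := by omega
  set Y := (y % 4294967296).toNat with hYdef
  set G := xsum Y s 33 with hGdef
  have hGlt : G < 4294967296 := xsum_lt Y s hY 33
  have hG32 : G >>> 32 = 0 := by
    rw [Nat.shiftRight_eq_div_pow]
    exact Nat.div_eq_of_lt (lt_of_lt_of_le hGlt (by norm_num))
  show undo_right y ↑s = undo_right_alt y ↑s
  have hA : undo_right y ↑s = ↑G := by
    show undoRightLoopA y ↑s ((0:Nat):Int) ((0:Nat):Int) ((0:Nat):Int) 33 = ↑G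
    rw [bridgeA y s hs hs32 33 0 0 0, ← hYdef]
    have h := modelA_eq Y s hY hs hs32 33 0 0 (by omega)
      (by
        intro _
        rw [show (32 - 0 * s) = 32 from by omega, hG32]
        simp)
    simp only [Nat.zero_mul, Nat.min_eq_left (by omega : (0:Nat) ≤ 32), Nat.sub_zero] at h
    rw [← hGdef, hG32] at h
    rw [h]
  have hB : undo_right_alt y ↑s = ↑G := by
    show undoRightLoopB (PySem.Int.band y 4294967295) ↑s (PySem.Int.band y 4294967295) ((0:Nat):Int) 33 = ↑G
    rw [show PySem.Int.band y 4294967295 = ↑Y from by rw [band_mask]; omega]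
    rw [bridgeB Y s 33 Y 0]
    have h := modelB_eq Y s hY hs 33 0 (by omega) (by omega)
    rw [show xsum Y s 1 = Y from by simp [xsum]] at h
    rw [h]
  rw [hA, hB]
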